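-- pv_equiv track=rewrite | github.com/MILOUDIAS/TinyMOA | test/integration/system/test_system.py | dcim_expected
-- ===== SOURCE A (Python) =====
-- def dcim_expected(weight_rows, act_planes, N, P):
--     """Compute expected DCIM output for N-wide array with P-bit precision.
--
--     weight_rows: list of N ints, each is an N-bit word (row-major, bit[col]=W[row][col])
--     act_planes: list of P ints, each is an N-bit word (MSB plane first)
--     Returns: list of N signed ints
--     """
--     # Build weight_reg[col] by transposing rows
--     weight_reg = []
--     for col in range(N):
--         bits = 0
--         for row in range(N):
--             if weight_rows[row] & (1 << col):
--                 bits |= 1 << row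
--         weight_reg.append(bits)
--
--     # Shift-accumulate across bit-planes (MSB first)
--     shift_acc = [0] * N
--     for act_word in act_planes:
--         act_bits = act_word & ((1 << N) - 1)
--         for col in range(N):
--             xnor = ~(weight_reg[col] ^ act_bits) & ((1 << N) - 1)
--             pc = bin(xnor).count("1")
--             shift_acc[col] = (shift_acc[col] << 1) + pc
--
--     # Signed conversion: 2*shift_acc - bias
--     bias = N * ((1 << P) - 1)
--     return [2 * s - bias for s in shift_acc]
-- ===== SOURCE B (Python) =====
-- def dcim_expected(weight_rows, act_planes, N, P):
--     L = len(act_planes)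
--     top = (1 << L) - 1
--     act_row = [0] * N
--     for w in act_planes:
--         act_row = [2 * act_row[r] + (w // (1 << r)) % 2 for r in range(N)]
--     bias = N * ((1 << P) - 1)
--     out = []
--     for col in range(N):
--         s = 0
--         for row in range(N):
--             if (weight_rows[row] // (1 << col)) % 2:
--                 s += act_row[row]
--             else:
--                 s += top - act_row[row]
--         out.append(2 * s - bias)
--     return out
-- ===== Notes on version B (the rewrite author's own statement) =====
-- stated objective: faster
-- what changed: Instead of transposing the weights into per-column registers and doing an XNOR+popcount over all N rows for every column in every bit-plane (O(P*N^2)), B accumulates each row's activation value once across the planes (O(P*N)) and then computes each column as a single pass over rows choosing act_row or its (2^L-1)-complement (O(N^2)); intended as asymptotically faster, measured 2-16x on a timing run's growing inputs.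
import Mathlib
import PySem

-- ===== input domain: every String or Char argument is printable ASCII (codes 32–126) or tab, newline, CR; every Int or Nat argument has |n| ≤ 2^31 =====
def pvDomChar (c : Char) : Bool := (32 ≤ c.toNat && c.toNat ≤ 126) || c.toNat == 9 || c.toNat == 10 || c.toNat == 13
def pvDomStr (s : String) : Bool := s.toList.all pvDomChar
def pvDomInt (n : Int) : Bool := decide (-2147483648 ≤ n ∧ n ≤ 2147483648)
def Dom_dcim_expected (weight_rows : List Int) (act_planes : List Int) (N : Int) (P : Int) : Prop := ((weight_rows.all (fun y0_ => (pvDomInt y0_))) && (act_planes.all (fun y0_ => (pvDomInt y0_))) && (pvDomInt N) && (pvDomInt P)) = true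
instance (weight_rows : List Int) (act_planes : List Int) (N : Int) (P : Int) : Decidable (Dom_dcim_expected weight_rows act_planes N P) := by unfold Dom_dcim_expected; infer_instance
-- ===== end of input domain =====

-- ===== PORT A =====
-- Literal port of A. Python's `&`, `|`, `^`, `~`, `<<` are PySem.Int.band/bor/bxor/Int.not/`<<<`;
-- `bin(xnor).count("1")` is xnor.bit_count() = PySem.Int.bitCount (exact here: xnor is masked, hence ≥ 0).
def dcim_expected (weight_rows : List Int) (act_planes : List Int) (N : Int) (P : Int) : List Int :=
  let n := N.toNat
  let weight_reg : List Int :=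
    (List.range n).foldl (fun (acc : List Int) (col : Nat) =>
      acc ++ [(List.range n).foldl (fun bits row =>
        if PySem.Int.band (weight_rows.getD row 0) ((1:Int) <<< col) ≠ 0 then
          PySem.Int.bor bits ((1:Int) <<< row)
        else bits) 0]) []
  let sa0 : List Int := (List.range n).map (fun _ => (0:Int))
  let sa := act_planes.foldl (fun sa act_word =>
    let act_bits := PySem.Int.band act_word ((1:Int) <<< n - 1)
    (List.range n).foldl (fun sa col =>
      let xnor := PySem.Int.band (Int.not (PySem.Int.bxor (weight_reg.getD col 0) act_bits)) ((1:Int) <<< n - 1)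
      let pc : Int := (PySem.Int.bitCount xnor : Nat)
      sa.set col ((sa.getD col 0) <<< (1:Nat) + pc)) sa) sa0
  let bias := N * ((1:Int) <<< P.toNat - 1)
  sa.map (fun s => 2 * s - bias)

-- ===== PORT B =====
-- Port of B (Source B): per-row activation values accumulated once across planes, then one pass
-- over rows per column; `//` and `%` are PySem.Int.floordiv / PySem.Int.mod.
def dcim_expected_alt (weight_rows : List Int) (act_planes : List Int) (N : Int) (P : Int) : List Int :=
  let L := act_planes.length
  let top : Int := (1:Int) <<< L - 1
  let n := N.toNat
  let ar0 : List Int := (List.range n).map (fun _ => (0:Int))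
  let act_row := act_planes.foldl (fun (ar : List Int) (w : Int) =>
    (List.range n).map (fun r => 2 * ar.getD r 0 + PySem.Int.mod (PySem.Int.floordiv w ((1:Int) <<< r)) 2)) ar0
  let bias := N * ((1:Int) <<< P.toNat - 1)
  (List.range n).foldl (fun (out : List Int) (col : Nat) =>
    let s := (List.range n).foldl (fun (s : Int) (row : Nat) =>
      if PySem.Int.mod (PySem.Int.floordiv (weight_rows.getD row 0) ((1:Int) <<< col)) 2 ≠ 0 then
        s + act_row.getD row 0
      else
        s + (top - act_row.getD row 0)) 0
    out ++ [2 * s - bias]) []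


-- ===== PRECONDITION & SPEC =====
-- Pre_ excludes exactly the inputs where Python A raises: P < 0 (ValueError in `1 << P`),
-- 0 ≤ N with fewer than N weight rows (IndexError), and N < 0 with a nonempty act_planes
-- (ValueError in `1 << N`; with act_planes empty that line never runs and A returns []).
def Pre_dcim_expected (weight_rows : List Int) (act_planes : List Int) (N : Int) (P : Int) : Prop :=
  0 ≤ P ∧ (0 ≤ N → N ≤ (weight_rows.length : Int)) ∧ (N < 0 → act_planes = [])
instance (weight_rows : List Int) (act_planes : List Int) (N : Int) (P : Int) : Decidable (Pre_dcim_expected weight_rows act_planes N P) := by unfold Pre_dcim_expected; infer_instance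

def pvWitness_dcim_expected : List Int × List Int × Int × Int := ([3, 1], [2, 3], 2, 2)

def Spec_dcim_expected (weight_rows : List Int) (act_planes : List Int) (N : Int) (P : Int) (out : List Int) : Prop := out = dcim_expected_alt weight_rows act_planes N P
instance (weight_rows : List Int) (act_planes : List Int) (N : Int) (P : Int) (out : List Int) : Decidable (Spec_dcim_expected weight_rows act_planes N P out) := by unfold Spec_dcim_expected; infer_instance

-- ===== CLAIM (what is proved, stated in full; the proofs are below) =====
def Claim_equal_dcim_expected : Prop := ∀ (weight_rows : List Int) (act_planes : List Int) (N : Int) (P : Int), Dom_dcim_expected weight_rows act_planes N P → Pre_dcim_expected weight_rows act_planes N P → Spec_dcim_expected weight_rows act_planes N P (dcim_expected weight_rows act_planes N P)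

-- ===== LEMMAS AND PROOFS =====

def pvBit (w : Int) (c : Nat) : Bool :=
  if 0 ≤ w then w.toNat.testBit c else !((-w - 1).toNat.testBit c)

theorem pv_shiftLeft_one (s : Int) : s <<< (1:Nat) = 2 * s := by
  rw [Int.shiftLeft_eq]; ring

theorem pv_one_shiftLeft (c : Nat) : (1 : Int) <<< c = (2 : Int) ^ c := by
  rw [Int.shiftLeft_eq]; ring

theorem pv_testBit_compl (n : Nat) : ∀ v i : Nat, v < 2 ^ n →
    (2 ^ n - 1 - v).testBit i = (decide (i < n) && !(v.testBit i)) := by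
  induction n with
  | zero => intro v i h; interval_cases v; simp
  | succ n ih =>
    intro v i h
    have h2 : 2 ^ (n+1) = 2 * 2 ^ n := by ring
    have hp : 0 < 2 ^ n := Nat.two_pow_pos n
    cases i with
    | zero =>
      simp only [Nat.testBit_zero, Nat.zero_lt_succ, decide_true, Bool.true_and]
      have hv : (2 ^ (n+1) - 1 - v) % 2 = 1 - v % 2 := by rw [h2] at h ⊢; omega
      rw [hv]
      rcases Nat.mod_two_eq_zero_or_one v with h2' | h2' <;> simp [h2']
    | succ i =>
      rw [Nat.testBit_add_one, Nat.testBit_add_one]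
      have hd : (2 ^ (n+1) - 1 - v) / 2 = 2 ^ n - 1 - v / 2 := by rw [h2] at h ⊢; omega
      rw [hd, ih (v / 2) i (by rw [h2] at h; omega)]
      simp

theorem pv_bitCount_sum (n : Nat) : ∀ m : Nat, m < 2 ^ n →
    ((PySem.Int.bitCount (m : Int) : Nat) : Int)
      = ((List.range n).map (fun i => if m.testBit i then (1 : Int) else 0)).sum := by
  induction n with
  | zero => intro m h; interval_cases m; simp [PySem.Int.bitCount_zero]
  | succ n ih =>
    intro m h
    rw [List.range_succ_eq_map, List.map_cons, List.sum_cons, List.map_map]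
    have hmap : (List.range n).map ((fun i => if m.testBit i then (1:Int) else 0) ∘ Nat.succ)
        = (List.range n).map (fun i => if (m / 2).testBit i then (1:Int) else 0) :=
      List.map_congr_left (by intro i _; simp [Nat.testBit_add_one])
    rw [hmap, ← ih (m / 2) (by omega)]
    rcases Nat.eq_zero_or_pos m with hm | hm
    · subst hm; simp [PySem.Int.bitCount_zero]
    · rw [PySem.Int.bitCount_natCast hm]
      push_cast
      rw [Nat.testBit_zero]
      rcases Nat.mod_two_eq_zero_or_one m with h2' | h2' <;> simp [h2'] <;> omega

@[simp] theorem pvBit_natCast (m : Nat) (c : Nat) : pvBit (m : Int) c = m.testBit c := by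
  simp [pvBit]

theorem pvBit_neg (w : Int) (hw : ¬ 0 ≤ w) (c : Nat) :
    pvBit w c = !((-w - 1).toNat.testBit c) := by simp [pvBit, hw]

theorem pv_band_pow (w : Int) (c : Nat) :
    PySem.Int.band w ((2 : Int) ^ c) = if pvBit w c then (2 : Int) ^ c else 0 := by
  have hc : ((2 : Int) ^ c) = ((2 ^ c : Nat) : Int) := by push_cast; ring
  have h1 : ((2 : Int) ^ c).toNat = 2 ^ c := by rw [hc]; exact Int.toNat_natCast _
  by_cases hw : 0 ≤ w
  · rcases Int.eq_ofNat_of_zero_le hw with ⟨m, rfl⟩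
    rw [hc, PySem.Int.band_natCast, Nat.and_two_pow]
    cases h : m.testBit c <;> simp [h, hc.symm]
  · rw [PySem.Int.band, if_neg hw, if_pos (show (0:Int) ≤ (2:Int)^c by positivity), h1,
      Nat.and_comm, Nat.and_two_pow, pvBit_neg w hw]
    cases hb : (-w - 1).toNat.testBit c <;> simp [hc.symm]

theorem pv_band_mask (w : Int) (n : Nat) :
    ∃ A : Nat, PySem.Int.band w ((2 : Int) ^ n - 1) = (A : Int) ∧ A < 2 ^ n ∧
      ∀ i, A.testBit i = (decide (i < n) && pvBit w i) := by
  have hp : 0 < 2 ^ n := Nat.two_pow_pos n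
  have hc : ((2 : Int) ^ n - 1) = ((2 ^ n - 1 : Nat) : Int) := by push_cast [hp]; ring
  have h0 : (0:Int) ≤ (2:Int) ^ n - 1 := by
    have : (0:Int) < 2 ^ n := by positivity
    omega
  have h1 : ((2 : Int) ^ n - 1).toNat = 2 ^ n - 1 := by rw [hc]; exact Int.toNat_natCast _
  by_cases hw : 0 ≤ w
  · rcases Int.eq_ofNat_of_zero_le hw with ⟨m, rfl⟩
    refine ⟨m % 2 ^ n, ?_, Nat.mod_lt _ hp, ?_⟩
    · rw [hc, PySem.Int.band_natCast, Nat.and_two_pow_sub_one_eq_mod]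
    · intro i; rw [Nat.testBit_mod_two_pow]; simp
  · refine ⟨2 ^ n - 1 - (-w - 1).toNat % 2 ^ n, ?_, by omega, ?_⟩
    · rw [PySem.Int.band, if_neg hw, if_pos h0, h1, Nat.and_comm,
        Nat.and_two_pow_sub_one_eq_mod]
    · intro i
      rw [pv_testBit_compl n _ i (Nat.mod_lt _ hp), Nat.testBit_mod_two_pow,
        pvBit_neg w hw]
      cases hd : decide (i < n) <;> simp

theorem pv_not_natCast (k : Nat) : Int.not (k : Int) = -(k : Int) - 1 := by
  show Int.not (Int.ofNat k) = _
  rw [Int.not]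
  simp [Int.negSucc_eq]
  ring

theorem pv_mod_floordiv (w : Int) (c : Nat) :
    PySem.Int.mod (PySem.Int.floordiv w ((1 : Int) <<< c)) 2 =
      if pvBit w c then 1 else 0 := by
  rw [pv_one_shiftLeft]
  have hp : (0:Int) < 2 ^ c := by positivity
  rw [PySem.Int.floordiv_eq_ediv_of_pos hp, PySem.Int.mod_eq_emod_of_pos (by norm_num)]
  by_cases hw : 0 ≤ w
  · rcases Int.eq_ofNat_of_zero_le hw with ⟨m, rfl⟩
    have hdiv : (m : Int) / (2:Int) ^ c = ((m / 2 ^ c : Nat) : Int) := by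
      rw [Int.natCast_ediv]; push_cast; ring_nf
    rw [hdiv, pvBit_natCast, Nat.testBit_eq_decide_div_mod_eq]
    rcases Nat.mod_two_eq_zero_or_one (m / 2 ^ c) with h2 | h2 <;> simp [h2] <;> omega
  · set u := (-w - 1).toNat with hu
    have hwu : w = -(u : Int) - 1 := by simp [hu]; omega
    set q := u / 2 ^ c with hq
    set s := u % 2 ^ c with hs
    have hus : u = 2 ^ c * q + s := by rw [hq, hs]; exact (Nat.div_add_mod u (2 ^ c)).symm
    have hslt : (s : Int) < (2:Int) ^ c := by
      have := hs ▸ Nat.mod_lt u (Nat.two_pow_pos c)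
      exact_mod_cast this
    have hwdecomp : w = ((2:Int) ^ c - 1 - (s : Int)) + (2:Int) ^ c * (-(q:Int) - 1) := by
      rw [hwu]
      have : ((u : Nat) : Int) = (2:Int)^c * (q : Int) + (s : Int) := by
        exact_mod_cast congrArg (Nat.cast : Nat → Int) hus
      rw [this]; ring
    have hdq : w / (2:Int) ^ c = -(q:Int) - 1 := by
      rw [hwdecomp, Int.add_mul_ediv_left _ _ (ne_of_gt hp),
        Int.ediv_eq_zero_of_lt (by omega) (by omega)]
      ring
    rw [hdq]
    rcases Nat.mod_two_eq_zero_or_one q with h2 | h2 <;>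
      simp [pvBit_neg w hw, ← hu, Nat.testBit_eq_decide_div_mod_eq, ← hq, h2] <;> omega

theorem pv_setfold (g : Nat → Int → Int) (sa : List Int) (m : Nat) :
    ((List.range m).foldl (fun l col => l.set col (g col (l.getD col 0))) sa).length = sa.length ∧
    ∀ j, ((List.range m).foldl (fun l col => l.set col (g col (l.getD col 0))) sa).getD j 0 =
      if j < m ∧ j < sa.length then g j (sa.getD j 0) else sa.getD j 0 := by
  induction m with
  | zero => simp
  | succ m ih =>
    rw [List.range_succ, List.foldl_append, List.foldl_cons, List.foldl_nil]
    obtain ⟨ihl, ihe⟩ := ih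
    constructor
    · rw [List.length_set, ihl]
    · intro j
      rw [List.getD_eq_getElem?_getD, List.getElem?_set, ihl]
      have hm := ihe m
      rw [if_neg (by omega)] at hm
      by_cases hjm : m = j
      · subst hjm
        by_cases hlen : m < sa.length
        · rw [if_pos rfl, if_pos hlen, hm, Option.getD_some, if_pos ⟨by omega, hlen⟩]
        · rw [if_pos rfl, if_neg hlen, if_neg (by omega), Option.getD_none,
            List.getD_eq_default _ _ (by omega)]
      · rw [if_neg hjm, ← List.getD_eq_getElem?_getD, ihe j]
        by_cases h1 : j < m ∧ j < sa.length
        · rw [if_pos h1, if_pos ⟨by omega, h1.2⟩]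
        · rw [if_neg h1, if_neg (by omega)]

theorem pv_foldl_lin (hp : Int → Int) (ps : List Int) :
    ∀ c : Int, ps.foldl (fun s p => 2 * s + hp p) c =
      2 ^ ps.length * c + ps.foldl (fun s p => 2 * s + hp p) 0 := by
  induction ps with
  | nil => intro c; simp
  | cons p tl ih =>
    intro c
    rw [List.foldl_cons, List.foldl_cons, ih (2 * c + hp p), ih (2 * 0 + hp p)]
    simp [List.length_cons, pow_succ]
    ring

theorem pv_foldl_compl (hp : Int → Int) (ps : List Int) :
    ps.foldl (fun s p => 2 * s + (1 - hp p)) 0 =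
      2 ^ ps.length - 1 - ps.foldl (fun s p => 2 * s + hp p) 0 := by
  induction ps with
  | nil => simp
  | cons p tl ih =>
    rw [List.foldl_cons, List.foldl_cons, pv_foldl_lin (fun p => 1 - hp p) tl,
      pv_foldl_lin hp tl (2 * 0 + hp p), ih]
    simp [List.length_cons, pow_succ]
    ring

theorem pv_foldl_sum (n : Nat) (g : Nat → Int → Int) (ps : List Int) :
    ps.foldl (fun s p => 2 * s + ((List.range n).map (fun r => g r p)).sum) 0 =
      ((List.range n).map (fun r => ps.foldl (fun s p => 2 * s + g r p) 0)).sum := by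
  induction ps with
  | nil => simp
  | cons p tl ih =>
    rw [List.foldl_cons, pv_foldl_lin _ tl, ih]
    have h1 : ∀ r, tl.foldl (fun s p => 2 * s + g r p) (2 * 0 + g r p) =
        2 ^ tl.length * g r p + tl.foldl (fun s p => 2 * s + g r p) 0 := by
      intro r; rw [pv_foldl_lin (g r) tl]; ring_nf
    calc (2:Int) ^ tl.length * (2 * 0 + ((List.range n).map (fun r => g r p)).sum) +
          ((List.range n).map (fun r => tl.foldl (fun s p => 2 * s + g r p) 0)).sum
        = ((List.range n).map (fun r => 2 ^ tl.length * g r p)).sum +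
          ((List.range n).map (fun r => tl.foldl (fun s p => 2 * s + g r p) 0)).sum := by
          rw [List.sum_map_mul_left]; ring
      _ = _ := by
          rw [← PySem.List.sum_map_add_int]
          apply congrArg
          apply List.map_congr_left
          intro r _
          rw [List.foldl_cons, h1 r]

theorem pv_wreg_char (wr : List Int) (col : Nat) (n : Nat) :
    ∃ W : Nat,
      (List.range n).foldl (fun bits row =>
        if PySem.Int.band (wr.getD row 0) ((1:Int) <<< col) ≠ 0 then
          PySem.Int.bor bits ((1:Int) <<< row) else bits) 0 = (W : Int) ∧
      ∀ i, W.testBit i = (decide (i < n) && pvBit (wr.getD i 0) col) := by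
  induction n with
  | zero => exact ⟨0, by simp, by simp [Nat.zero_testBit]⟩
  | succ m ih =>
    obtain ⟨W, hW, hbit⟩ := ih
    rw [List.range_succ, List.foldl_append, List.foldl_cons, List.foldl_nil, hW]
    have hcond : (PySem.Int.band (wr.getD m 0) ((1:Int) <<< col) ≠ 0) ↔
        pvBit (wr.getD m 0) col = true := by
      rw [pv_one_shiftLeft, pv_band_pow]
      cases h : pvBit (wr.getD m 0) col <;> simp
    by_cases hc : pvBit (wr.getD m 0) col = true
    · rw [if_pos (hcond.mpr hc)]
      refine ⟨W ||| 2 ^ m, ?_, fun i => ?_⟩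
      · rw [pv_one_shiftLeft, show ((2:Int)^m) = ((2^m : Nat) : Int) by push_cast; ring,
          PySem.Int.bor_natCast]
      · rw [Nat.testBit_or, hbit i, Nat.testBit_two_pow]
        rcases Nat.lt_trichotomy i m with h | h | h
        · rw [decide_eq_true h, decide_eq_true (show i < m + 1 by omega),
            decide_eq_false (show ¬ m = i by omega)]
          simp
        · subst h
          rw [decide_eq_false (lt_irrefl i), decide_eq_true rfl,
            decide_eq_true (show i < i + 1 by omega), hc]
          simp
        · rw [decide_eq_false (show ¬ i < m by omega),
            decide_eq_false (show ¬ m = i by omega),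
            decide_eq_false (show ¬ i < m + 1 by omega)]
          simp
    · rw [if_neg (fun h => hc (hcond.mp h))]
      refine ⟨W, rfl, fun i => ?_⟩
      rw [hbit i]
      rcases Nat.lt_trichotomy i m with h | h | h
      · rw [decide_eq_true h, decide_eq_true (show i < m + 1 by omega)]
      · subst h
        rw [decide_eq_false (lt_irrefl i), decide_eq_true (show i < i + 1 by omega),
          Bool.eq_false_iff.mpr hc]
        simp
      · rw [decide_eq_false (show ¬ i < m by omega),
          decide_eq_false (show ¬ i < m + 1 by omega)]

def pvAgree (wr : List Int) (p : Int) (col r : Nat) : Int :=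
  if pvBit (wr.getD r 0) col == pvBit p r then 1 else 0

def pvV (ap : List Int) (r : Nat) : Int :=
  ap.foldl (fun a p => 2 * a + (if pvBit p r then 1 else 0)) 0

theorem pv_pc_sum (wr : List Int) (n col : Nat) (p : Int) (Wb : Int)
    (hWb : Wb = (List.range n).foldl (fun bits row =>
        if PySem.Int.band (wr.getD row 0) ((1:Int) <<< col) ≠ 0 then
          PySem.Int.bor bits ((1:Int) <<< row) else bits) 0) :
    ((PySem.Int.bitCount (PySem.Int.band
        (Int.not (PySem.Int.bxor Wb (PySem.Int.band p ((1:Int) <<< n - 1))))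
        ((1:Int) <<< n - 1)) : Nat) : Int)
      = ((List.range n).map (fun r => pvAgree wr p col r)).sum := by
  obtain ⟨W, hW, hWbit⟩ := pv_wreg_char wr col n
  obtain ⟨A, hA, hAlt, hAbit⟩ := pv_band_mask p n
  rw [hWb, hW, pv_one_shiftLeft, hA, PySem.Int.bxor_natCast, pv_not_natCast]
  obtain ⟨X, hX, hXlt, hXbit⟩ := pv_band_mask (-(((W ^^^ A : Nat) : Int)) - 1) n
  rw [hX, pv_bitCount_sum n X hXlt]
  apply congrArg
  apply List.map_congr_left
  intro i hi
  rw [List.mem_range] at hi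
  rw [hXbit i, pvBit_neg _ (by omega), show (-(-(((W ^^^ A : Nat) : Int)) - 1) - 1) = ((W ^^^ A : Nat) : Int) by ring,
    Int.toNat_natCast, Nat.testBit_xor, hWbit i, hAbit i, decide_eq_true hi]
  simp only [Bool.true_and, pvAgree]
  cases h1 : pvBit (wr.getD i 0) col <;> cases h2 : pvBit p i <;> simp

theorem pv_planes_fold (n : Nat) (pc : Int → Nat → Int) (ap : List Int) :
    ∀ sa : List Int, sa.length = n →
      ((ap.foldl (fun sa p => (List.range n).foldl
          (fun l col => l.set col ((l.getD col 0) <<< (1:Nat) + pc p col)) sa) sa).length = n ∧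
       ∀ col, col < n →
        (ap.foldl (fun sa p => (List.range n).foldl
          (fun l col => l.set col ((l.getD col 0) <<< (1:Nat) + pc p col)) sa) sa).getD col 0 =
          ap.foldl (fun s p => 2 * s + pc p col) (sa.getD col 0)) := by
  induction ap with
  | nil => intro sa h; exact ⟨h, fun col _ => rfl⟩
  | cons p tl ih =>
    intro sa h
    rw [List.foldl_cons]
    obtain ⟨hl, he⟩ := pv_setfold (fun c x => x <<< (1:Nat) + pc p c) sa n
    obtain ⟨ihl, ihe⟩ := ih _ (hl.trans h)
    refine ⟨ihl, fun col hcol => ?_⟩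
    rw [ihe col hcol, he col, if_pos ⟨hcol, by omega⟩, pv_shiftLeft_one, List.foldl_cons]

theorem pv_actrow_fold (n : Nat) (ap : List Int) :
    ∀ ar : List Int, ar.length = n →
      ((ap.foldl (fun (ar : List Int) (w : Int) => (List.range n).map
          (fun r => 2 * ar.getD r 0 + PySem.Int.mod (PySem.Int.floordiv w ((1:Int) <<< r)) 2)) ar).length = n ∧
       ∀ r, r < n →
        (ap.foldl (fun (ar : List Int) (w : Int) => (List.range n).map
          (fun r => 2 * ar.getD r 0 + PySem.Int.mod (PySem.Int.floordiv w ((1:Int) <<< r)) 2)) ar).getD r 0 =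
          ap.foldl (fun a w => 2 * a + (if pvBit w r then 1 else 0)) (ar.getD r 0)) := by
  induction ap with
  | nil => intro ar h; exact ⟨h, fun r _ => rfl⟩
  | cons w tl ih =>
    intro ar h
    rw [List.foldl_cons]
    obtain ⟨ihl, ihe⟩ := ih ((List.range n).map
        (fun r => 2 * ar.getD r 0 + PySem.Int.mod (PySem.Int.floordiv w ((1:Int) <<< r)) 2))
      (by rw [List.length_map, List.length_range])
    refine ⟨ihl, fun r hr => ?_⟩
    rw [ihe r hr, PySem.List.getD_map_range _ _ _ _ hr, pv_mod_floordiv, List.foldl_cons]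

theorem pv_bridge (wr ap : List Int) (col r : Nat) :
    ap.foldl (fun s p => 2 * s + pvAgree wr p col r) 0 =
      if pvBit (wr.getD r 0) col then pvV ap r else 2 ^ ap.length - 1 - pvV ap r := by
  cases h : pvBit (wr.getD r 0) col
  · rw [if_neg (by simp), pvV, ← pv_foldl_compl (fun p => if pvBit p r then 1 else 0) ap]
    apply PySem.List.foldl_congr_mem
    intro acc p _
    rw [pvAgree, h]
    cases h2 : pvBit p r <;> simp
  · rw [if_pos rfl, pvV]
    apply PySem.List.foldl_congr_mem
    intro acc p _
    rw [pvAgree, h]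
    cases h2 : pvBit p r <;> simp

theorem pv_main (wr ap : List Int) (N P : Int) :
    dcim_expected wr ap N P = dcim_expected_alt wr ap N P := by
  simp only [dcim_expected, dcim_expected_alt]
  rw [PySem.List.foldl_append_singleton_eq_map, List.nil_append,
    PySem.List.foldl_append_singleton_eq_map, List.nil_append]
  set n := N.toNat with hn
  have hsa0 : ((List.range n).map (fun _ => (0:Int))).length = n := by
    rw [List.length_map, List.length_range]
  obtain ⟨hlen, helem⟩ := pv_planes_fold n
    (fun (p : Int) (col : Nat) => ((PySem.Int.bitCount (PySem.Int.band
        (Int.not (PySem.Int.bxor (((List.range n).map (fun (col : Nat) => (List.range n).foldl (fun (bits : Int) (row : Nat) =>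
          if PySem.Int.band (wr.getD row 0) ((1:Int) <<< col) ≠ 0 then
            PySem.Int.bor bits ((1:Int) <<< row) else bits) 0)).getD col 0)
          (PySem.Int.band p ((1:Int) <<< n - 1))))
        ((1:Int) <<< n - 1)) : Nat) : Int))
    ap ((List.range n).map (fun _ => (0:Int))) hsa0
  obtain ⟨harl, hare⟩ := pv_actrow_fold n ap ((List.range n).map (fun _ => (0:Int))) hsa0
  apply List.ext_getElem
  · rw [List.length_map, hlen, List.length_map, List.length_range]
  intro i hi1 hi2
  rw [List.length_map, hlen] at hi1
  rw [List.getElem_map, List.getElem_map, List.getElem_range,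
    ← List.getD_eq_getElem _ 0 (by rw [hlen]; exact hi1), helem i hi1,
    PySem.List.getD_map_range _ _ _ _ hi1]
  rw [show ((List.range n).map (fun _ => (0:Int))).getD i 0 = 0 from by
    rw [PySem.List.getD_map_range _ _ _ _ hi1]]
  congr 1
  congr 1
  · -- A side
    rw [PySem.List.foldl_congr_mem ap _
        (fun s p => 2 * s + ((List.range n).map (fun r => pvAgree wr p i r)).sum) 0
        (fun acc p _ => by rw [pv_pc_sum wr n i p _ rfl]),
      pv_foldl_sum n (fun r p => pvAgree wr p i r) ap,
      List.map_congr_left (fun r _ => pv_bridge wr ap i r),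
      PySem.List.foldl_congr_mem (List.range n) _
        (fun (s : Int) (row : Nat) => s +
          (if pvBit (wr.getD row 0) i then pvV ap row
           else 2 ^ ap.length - 1 - pvV ap row)) 0
        (fun acc row hrow => by
          rw [List.mem_range] at hrow
          rw [pv_mod_floordiv, hare row hrow,
            show ((List.range n).map (fun _ => (0:Int))).getD row 0 = 0 from by
              rw [PySem.List.getD_map_range _ _ _ _ hrow]]
          cases h : pvBit (wr.getD row 0) i <;>
            simp only [h, pvV, pv_one_shiftLeft, if_true] <;> norm_num),
      PySem.List.foldl_add, zero_add]

-- ===== VERDICT (by name: the statement is the Claim_ definition above) =====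
theorem dcim_expected_spec : Claim_equal_dcim_expected := by
  intro wr ap N P _ _
  unfold Spec_dcim_expected
  exact pv_main wr ap N P
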